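-- pv_equiv track=rewrite | github.com/mjpost/sockeye-scripts | source_factors/factors.py | compute_bpe
-- ===== SOURCE A (Python) =====
-- def compute_bpe(bpe_str: str) -> str:
--     """
--     Computes NER-style features for a BPE stream. e.g.,
--
--     The boy ate the waff@@ le .
--       O   O   O   O      B  E O
--
--     The options are:
--     O: a complete word
--     B: beginning of a multi-token word
--     I: interior of a multi-token word
--     E: end of a multi-token word
--
--     :param bpe_str: The BPE string.
--     :return: A string of BPE factors.
--     """
--     factors = []
--     was_in_bpe = False
--     for i, token in enumerate(bpe_str.split()):
--         now_in_bpe = token.endswith('@@')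
--         if was_in_bpe:
--             if now_in_bpe:
--                 factor = 'I'
--             else:
--                 factor = 'E'
--         else:
--             if now_in_bpe:
--                 factor = 'B'
--             else:
--                 factor = 'O'
--
--         was_in_bpe = now_in_bpe
--         factors.append(factor)
--
--     return ' '.join(factors)
-- ===== SOURCE B (Python) =====
-- def compute_bpe(bpe_str: str) -> str:
--     # Run-length decomposition: count each maximal run of continuation-marked tokens
--     # and emit the whole word's label block at once, then join the blocks.
--     words = []
--     run = 0
--     for tok in bpe_str.split():
--         if tok.endswith('@@'):
--             run += 1
--         else:
--             words.append('O' if run == 0 else ' '.join(['B'] + ['I'] * (run - 1) + ['E']))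
--             run = 0
--     if run:
--         words.append(' '.join(['B'] + ['I'] * (run - 1)))
--     return ' '.join(words)
-- ===== Notes on version B (the rewrite author's own statement) =====
-- stated objective: alternative
-- what changed: Replaces A's per-token stateful labelling (a carried was-in-bpe boolean, one label appended per token) with run-length grouping: count each maximal run of continuation-marked tokens and emit a whole word's label block at once (O, or B/I/E block, or a trailing B/I block), then join the blocks.
import Mathlib
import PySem

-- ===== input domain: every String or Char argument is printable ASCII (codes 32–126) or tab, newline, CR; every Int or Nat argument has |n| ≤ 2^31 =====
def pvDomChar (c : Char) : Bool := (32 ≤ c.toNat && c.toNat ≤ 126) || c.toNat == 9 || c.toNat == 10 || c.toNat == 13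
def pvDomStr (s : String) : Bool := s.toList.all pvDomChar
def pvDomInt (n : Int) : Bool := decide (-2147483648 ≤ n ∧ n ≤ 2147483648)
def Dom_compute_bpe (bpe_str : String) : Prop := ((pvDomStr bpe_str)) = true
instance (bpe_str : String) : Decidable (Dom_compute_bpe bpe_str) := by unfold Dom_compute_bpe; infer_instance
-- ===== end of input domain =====

-- B relabels by run-length grouping (one label block per word run) instead of A's
-- per-token stateful pass; same O(n) cost, different decomposition.

-- ===== PORT A =====
def compute_bpe (bpe_str : String) : String :=
  let r := (PySem.Str.split₀ bpe_str).foldl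
    (fun (st : List String × Bool) token =>
      let now_in_bpe := PySem.Str.endswith token "@@"
      let factor := if st.2 then (if now_in_bpe then "I" else "E")
                    else (if now_in_bpe then "B" else "O")
      (st.1 ++ [factor], now_in_bpe)) ([], false)
  PySem.Str.join " " r.1

-- ===== PORT B =====
def compute_bpe_alt (bpe_str : String) : String :=
  let st := (PySem.Str.split₀ bpe_str).foldl
    (fun (st : List String × Nat) tok =>
      if PySem.Str.endswith tok "@@" then (st.1, st.2 + 1)
      else (st.1 ++ [if st.2 = 0 then "O"
                     else PySem.Str.join " " (["B"] ++ List.replicate (st.2 - 1) "I" ++ ["E"])], 0))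
    ([], 0)
  let words := if st.2 ≠ 0
    then st.1 ++ [PySem.Str.join " " (["B"] ++ List.replicate (st.2 - 1) "I")]
    else st.1
  PySem.Str.join " " words

-- ===== PRECONDITION & SPEC =====
def Spec_compute_bpe (bpe_str : String) (out : String) : Prop := out = compute_bpe_alt bpe_str
instance (bpe_str : String) (out : String) : Decidable (Spec_compute_bpe bpe_str out) := by unfold Spec_compute_bpe; infer_instance

-- ===== CLAIM (what is proved, stated in full; the proofs are below) =====
def Claim_equal_compute_bpe : Prop := ∀ (bpe_str : String), Dom_compute_bpe bpe_str → Spec_compute_bpe bpe_str (compute_bpe bpe_str)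

-- ===== LEMMAS AND PROOFS =====

-- the per-token label stream A produces
def pvLabels : Bool → List String → List String
  | _, [] => []
  | b, t :: ts =>
    (if b then (if PySem.Str.endswith t "@@" then "I" else "E")
     else (if PySem.Str.endswith t "@@" then "B" else "O")) :: pvLabels (PySem.Str.endswith t "@@") ts

-- the word blocks B produces, already joined
def pvWords : Nat → List String → List String
  | r, [] => if r = 0 then [] else [PySem.Str.join " " (["B"] ++ List.replicate (r - 1) "I")]
  | r, t :: ts =>
    if PySem.Str.endswith t "@@" then pvWords (r + 1) ts
    else (if r = 0 then "O"
          else PySem.Str.join " " (["B"] ++ List.replicate (r - 1) "I" ++ ["E"])) :: pvWords 0 ts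

-- the word blocks as label groups (not yet joined)
def pvGroups : Nat → List String → List (List String)
  | r, [] => if r = 0 then [] else [["B"] ++ List.replicate (r - 1) "I"]
  | r, t :: ts =>
    if PySem.Str.endswith t "@@" then pvGroups (r + 1) ts
    else (if r = 0 then ["O"] else ["B"] ++ List.replicate (r - 1) "I" ++ ["E"]) :: pvGroups 0 ts

theorem pv_afold (ts : List String) (acc : List String) (b : Bool) :
    (ts.foldl (fun (st : List String × Bool) token =>
      (st.1 ++ [if st.2 then (if PySem.Str.endswith token "@@" then "I" else "E")
                else (if PySem.Str.endswith token "@@" then "B" else "O")],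
       PySem.Str.endswith token "@@")) (acc, b)).1
    = acc ++ pvLabels b ts := by
  induction ts generalizing acc b with
  | nil => simp [pvLabels]
  | cons t ts ih =>
    simp only [List.foldl_cons]
    rw [ih]
    simp [pvLabels, List.append_assoc]

theorem pv_bfold (ts : List String) (ws : List String) (r : Nat) :
    (if (ts.foldl (fun (st : List String × Nat) tok =>
          if PySem.Str.endswith tok "@@" then (st.1, st.2 + 1)
          else (st.1 ++ [if st.2 = 0 then "O"
                         else PySem.Str.join " " (["B"] ++ List.replicate (st.2 - 1) "I" ++ ["E"])], 0))
        (ws, r)).2 ≠ 0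
     then (ts.foldl (fun (st : List String × Nat) tok =>
          if PySem.Str.endswith tok "@@" then (st.1, st.2 + 1)
          else (st.1 ++ [if st.2 = 0 then "O"
                         else PySem.Str.join " " (["B"] ++ List.replicate (st.2 - 1) "I" ++ ["E"])], 0))
        (ws, r)).1
       ++ [PySem.Str.join " " (["B"] ++ List.replicate
            ((ts.foldl (fun (st : List String × Nat) tok =>
                if PySem.Str.endswith tok "@@" then (st.1, st.2 + 1)
                else (st.1 ++ [if st.2 = 0 then "O"
                               else PySem.Str.join " " (["B"] ++ List.replicate (st.2 - 1) "I" ++ ["E"])], 0))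
              (ws, r)).2 - 1) "I")]
     else (ts.foldl (fun (st : List String × Nat) tok =>
          if PySem.Str.endswith tok "@@" then (st.1, st.2 + 1)
          else (st.1 ++ [if st.2 = 0 then "O"
                         else PySem.Str.join " " (["B"] ++ List.replicate (st.2 - 1) "I" ++ ["E"])], 0))
        (ws, r)).1)
    = ws ++ pvWords r ts := by
  induction ts generalizing ws r with
  | nil => by_cases h : r = 0 <;> simp [pvWords, h]
  | cons t ts ih =>
    simp only [List.foldl_cons]
    by_cases h : PySem.Str.endswith t "@@"
    · have h' : PySem.Chars.endswith t.toList ['@', '@'] = true := by simpa using h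
      simp only [h, if_true]
      rw [ih]
      simp [pvWords, h']
    · have h' : PySem.Chars.endswith t.toList ['@', '@'] = false := by simpa using h
      simp only [h, if_false, Bool.false_eq_true]
      rw [ih]
      simp [pvWords, h', List.append_assoc]

theorem pv_strJoin_singleton (p : String) : PySem.Str.join " " [p] = p := by
  simp [PySem.Str.join, PySem.Chars.join_singleton]

theorem pv_words_eq_map (ts : List String) (r : Nat) :
    pvWords r ts = (pvGroups r ts).map (PySem.Str.join " ") := by
  induction ts generalizing r with
  | nil => by_cases h : r = 0 <;> simp [pvWords, pvGroups, h]
  | cons t ts ih =>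
    by_cases h : PySem.Str.endswith t "@@"
    · have h' : PySem.Chars.endswith t.toList ['@', '@'] = true := by simpa using h
      simp [pvWords, pvGroups, h', ih]
    · have h' : PySem.Chars.endswith t.toList ['@', '@'] = false := by simpa using h
      by_cases hr : r = 0 <;>
        simp [pvWords, pvGroups, h', hr, ih, pv_strJoin_singleton]

theorem pv_groups_ne_nil (ts : List String) (r : Nat) (g : List String)
    (hg : g ∈ pvGroups r ts) : g ≠ [] := by
  induction ts generalizing r with
  | nil =>
    rcases r with _ | k
    · simp [pvGroups] at hg
    · simp [pvGroups] at hg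
      subst hg; simp
  | cons t ts ih =>
    by_cases h : PySem.Str.endswith t "@@"
    · simp only [pvGroups, h, if_true] at hg
      exact ih _ hg
    · simp only [pvGroups, h, if_false, Bool.false_eq_true, List.mem_cons] at hg
      rcases hg with hg | hg
      · subst hg; by_cases hr : r = 0 <;> simp [hr]
      · exact ih _ hg

theorem pv_flatten_groups (ts : List String) (r : Nat) :
    (pvGroups r ts).flatten
    = (if r = 0 then [] else "B" :: List.replicate (r - 1) "I") ++ pvLabels (r != 0) ts := by
  induction ts generalizing r with
  | nil => rcases r with _ | k <;> simp [pvGroups, pvLabels]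
  | cons t ts ih =>
    by_cases h : PySem.Str.endswith t "@@"
    · have h' : PySem.Chars.endswith t.toList ['@', '@'] = true := by simpa using h
      rw [pvGroups]
      simp only [h, if_true]
      rw [ih]
      rcases r with _ | k <;> simp [pvLabels, h', List.replicate_succ']
    · have h' : PySem.Chars.endswith t.toList ['@', '@'] = false := by simpa using h
      rw [pvGroups]
      simp only [h, if_false, Bool.false_eq_true]
      rw [List.flatten_cons, ih]
      rcases r with _ | k <;> simp [pvLabels, h']

theorem pv_chars_join_cons_append (sep : List Char) (a : List Char)
    (xs ys : List (List Char)) :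
    PySem.Chars.join sep ((a :: xs) ++ ys)
    = PySem.Chars.join sep (a :: xs)
      ++ (if ys = [] then [] else sep ++ PySem.Chars.join sep ys) := by
  induction xs generalizing a with
  | nil =>
    cases ys with
    | nil => simp
    | cons y ys => simp [PySem.Chars.join_cons_cons, PySem.Chars.join_singleton]
  | cons b xs ih =>
    simp only [List.cons_append]
    rw [PySem.Chars.join_cons_cons, PySem.Chars.join_cons_cons]
    have hb := ih b
    simp only [List.cons_append] at hb
    rw [hb]
    simp [List.append_assoc]

theorem pv_chars_join_flatten (sep : List Char) (l : List (List (List Char)))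
    (h : ∀ g ∈ l, g ≠ []) :
    PySem.Chars.join sep (l.map (PySem.Chars.join sep))
    = PySem.Chars.join sep l.flatten := by
  induction l with
  | nil => simp
  | cons g l ih =>
    obtain ⟨a, xs, rfl⟩ : ∃ a xs, g = a :: xs := by
      have hgne := h g (by simp)
      cases g with
      | nil => exact absurd rfl hgne
      | cons a xs => exact ⟨a, xs, rfl⟩
    cases l with
    | nil => simp [PySem.Chars.join_singleton]
    | cons g' l' =>
      have hg' : g' ≠ [] := h g' (by simp)
      have hfl : (g' :: l').flatten ≠ [] := by
        cases g' with
        | nil => exact absurd rfl hg'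
        | cons c cs => simp
      have hih := ih (fun g hg => h g (by simp [hg]))
      simp only [List.map_cons] at hih ⊢
      rw [PySem.Chars.join_cons_cons, hih]
      conv_rhs => rw [List.flatten_cons]
      rw [pv_chars_join_cons_append, if_neg hfl]
      simp [List.append_assoc]

theorem pv_str_eq_of_toList (s t : String) (h : s.toList = t.toList) : s = t := by
  have := congrArg String.ofList h
  simpa using this

theorem pv_str_join_flatten (l : List (List String)) (h : ∀ g ∈ l, g ≠ []) :
    PySem.Str.join " " (l.map (PySem.Str.join " "))
    = PySem.Str.join " " l.flatten := by
  apply pv_str_eq_of_toList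
  rw [PySem.Str.toList_join, PySem.Str.toList_join]
  have h1 : (l.map (PySem.Str.join " ")).map String.toList
      = (l.map (List.map String.toList)).map (PySem.Chars.join (" ".toList)) := by
    simp [List.map_map, Function.comp_def]
  rw [h1, pv_chars_join_flatten _ _ (by
    intro g hg
    simp only [List.mem_map] at hg
    obtain ⟨g', hg', rfl⟩ := hg
    simpa using h g' hg')]
  rw [List.map_flatten]

-- ===== VERDICT (by name: the statement is the Claim_ definition above) =====
theorem compute_bpe_spec : Claim_equal_compute_bpe := by
  intro s _
  unfold Spec_compute_bpe
  simp only [compute_bpe, compute_bpe_alt]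
  rw [pv_afold, pv_bfold]
  simp only [List.nil_append]
  rw [pv_words_eq_map, pv_str_join_flatten _ (pv_groups_ne_nil (PySem.Str.split₀ s) 0),
    pv_flatten_groups]
  simp
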